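-- pv_equiv track=rewrite | github.com/mcchilds01/advent-of-code | 2020/script/day_6.py | getForms2
-- ===== SOURCE A (Python) =====
-- def getForms2(forms_list: list) -> list:
--     customsForms = []
--     customsForm = []
--     for i in range(len(forms_list)):
--         if forms_list[i] == '':
--             customsForms.append(customsForm)
--             customsForm = []
--         else:
--             customsForm.append(forms_list[i])
--     customsForms.append(customsForm)
--     return customsForms
-- ===== SOURCE B (Python) =====
-- def getForms2(forms_list: list) -> list:
--     # delimiter-seek decomposition: repeatedly jump to the next '' and slice the group off
--     groups = []
--     rest = forms_list
--     while '' in rest: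
--         k = rest.index('')
--         groups.append(rest[:k])
--         rest = rest[k + 1:]
--     groups.append(rest)
--     return groups
-- ===== Notes on version B (the rewrite author's own statement) =====
-- stated objective: alternative
-- what changed: Replaces the accumulate-and-reset element-by-element fold with a delimiter-seek loop that finds the next '' via list.index and slices whole groups off the front.
import Mathlib
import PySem

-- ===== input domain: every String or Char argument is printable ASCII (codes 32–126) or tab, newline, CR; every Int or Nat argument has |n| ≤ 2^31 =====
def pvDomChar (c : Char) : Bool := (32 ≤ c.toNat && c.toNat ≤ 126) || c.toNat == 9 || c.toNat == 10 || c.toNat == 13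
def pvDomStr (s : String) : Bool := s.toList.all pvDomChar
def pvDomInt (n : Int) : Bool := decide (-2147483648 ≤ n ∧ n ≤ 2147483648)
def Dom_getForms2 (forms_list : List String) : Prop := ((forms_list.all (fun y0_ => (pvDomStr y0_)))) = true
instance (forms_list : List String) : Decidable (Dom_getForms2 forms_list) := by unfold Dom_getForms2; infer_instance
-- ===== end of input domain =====

-- B replaces A's accumulate-and-reset fold with a delimiter-seek loop (find next '' and slice); same O(n) cost, proved equal.


-- ===== PORT A =====
def getForms2 (forms_list : List String) : List (List String) :=
  let st := forms_list.foldl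
    (fun (st : List (List String) × List String) x =>
      if x = "" then (st.1 ++ [st.2], ([] : List String)) else (st.1, st.2 ++ [x]))
    (([] : List (List String)), ([] : List String))
  st.1 ++ [st.2]

-- ===== PORT B =====
-- termination helper used by the port's decreasing_by
theorem pv_index_lt {l : List String} {k : Nat} (h : PySem.List.index? l "" = some k) :
    l.length - (k + 1) < l.length := by
  obtain ⟨hk, _, _⟩ := PySem.List.getElem_of_index?_eq_some h
  omega

def getForms2_alt (forms_list : List String) : List (List String) :=
  match h : PySem.List.index? forms_list "" with
  | none => [forms_list]
  | some k => forms_list.take k :: getForms2_alt (forms_list.drop (k + 1))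
termination_by forms_list.length
decreasing_by simp only [List.length_drop]; exact pv_index_lt h

-- ===== PRECONDITION & SPEC =====
def Spec_getForms2 (forms_list : List String) (out : List (List String)) : Prop := out = getForms2_alt forms_list
instance (forms_list : List String) (out : List (List String)) : Decidable (Spec_getForms2 forms_list out) := by unfold Spec_getForms2; infer_instance

-- ===== CLAIM (what is proved, stated in full; the proofs are below) =====
def Claim_equal_getForms2 : Prop := ∀ (forms_list : List String), Dom_getForms2 forms_list → Spec_getForms2 forms_list (getForms2 forms_list)

-- ===== LEMMAS AND PROOFS =====

theorem alt_nil : getForms2_alt [] = [[]] := by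
  rw [getForms2_alt]
  split
  · rfl
  · next k h => simp [PySem.List.index?_eq_idxOf?] at h

theorem alt_cons_empty (t : List String) : getForms2_alt ("" :: t) = [] :: getForms2_alt t := by
  rw [getForms2_alt]
  split
  · next h => rw [PySem.List.index?_cons_self] at h; cases h
  · next k h =>
    rw [PySem.List.index?_cons_self] at h
    cases h
    simp

theorem alt_cons_ne {x : String} (hx : x ≠ "") (t : List String) :
    getForms2_alt (x :: t) =
      match getForms2_alt t with
      | [] => []
      | g :: gs => (x :: g) :: gs := by
  have hxx : PySem.List.index? (x :: t) "" = (PySem.List.index? t "").map (· + 1) :=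
    PySem.List.index?_cons_of_ne t hx
  rw [getForms2_alt]
  split
  · next h =>
    rw [hxx, Option.map_eq_none_iff] at h
    rw [getForms2_alt, h]
  · next k h =>
    rw [hxx, Option.map_eq_some_iff] at h
    obtain ⟨k', hk', rfl⟩ := h
    conv_rhs => rw [getForms2_alt, hk']
    simp [List.take_succ_cons, List.drop_succ_cons]

theorem alt_ne_nil (l : List String) : getForms2_alt l ≠ [] := by
  rw [getForms2_alt]
  cases h : PySem.List.index? l "" <;> simp

theorem key (l : List String) (acc : List (List String)) (cur : List String) :
    (let st := l.foldl
      (fun (st : List (List String) × List String) x =>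
        if x = "" then (st.1 ++ [st.2], ([] : List String)) else (st.1, st.2 ++ [x]))
      (acc, cur)
     st.1 ++ [st.2]) =
    acc ++ (match getForms2_alt l with
            | [] => [cur]
            | g :: gs => (cur ++ g) :: gs) := by
  induction l generalizing acc cur with
  | nil => simp [alt_nil]
  | cons x t ih =>
    by_cases hx : x = ""
    · subst hx
      simp only [List.foldl_cons, if_pos, alt_cons_empty]
      rw [ih]
      obtain ⟨g, gs, hg⟩ := List.exists_cons_of_ne_nil (alt_ne_nil t)
      simp [hg]
    · simp only [List.foldl_cons, if_neg hx, alt_cons_ne hx]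
      rw [ih]
      obtain ⟨g, gs, hg⟩ := List.exists_cons_of_ne_nil (alt_ne_nil t)
      simp [hg]

-- ===== VERDICT (by name: the statement is the Claim_ definition above) =====
theorem getForms2_spec : Claim_equal_getForms2 := by
  intro l _
  show getForms2 l = getForms2_alt l
  unfold getForms2
  rw [key]
  obtain ⟨g, gs, hg⟩ := List.exists_cons_of_ne_nil (alt_ne_nil l)
  simp [hg]
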